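-- pv_equiv track=rewrite | github.com/aliaksei-sidarau/LoadTests | Agent_MaxLoad_v2.py | get_next_size
-- ===== SOURCE A (Python) =====
-- g_batch_sizes = [10, 100, 200, 300, 500, 700, 1000]
--
-- def get_next_size(current_size, is_increase: bool = True):
--     if is_increase:
--         for _, x in enumerate(g_batch_sizes):
--             if x > current_size:
--                 return x
--     else:
--         for _, x in enumerate(reversed(g_batch_sizes)):
--             if x < current_size:
--                 return x
--     return current_size
-- ===== SOURCE B (Python) =====
-- g_batch_sizes = [10, 100, 200, 300, 500, 700, 1000]
--
-- def get_next_size(current_size, is_increase: bool = True):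
--     lo, hi = 0, len(g_batch_sizes)
--     if is_increase:
--         # bisect_right: first index with element > current_size
--         while lo < hi:
--             mid = (lo + hi) // 2
--             if g_batch_sizes[mid] <= current_size:
--                 lo = mid + 1
--             else:
--                 hi = mid
--         return g_batch_sizes[lo] if lo < len(g_batch_sizes) else current_size
--     else:
--         # bisect_left: first index with element >= current_size
--         while lo < hi:
--             mid = (lo + hi) // 2
--             if g_batch_sizes[mid] < current_size:
--                 lo = mid + 1
--             else:
--                 hi = mid
--         return g_batch_sizes[lo - 1] if lo - 1 >= 0 else current_size
-- ===== Notes on version B (the rewrite author's own statement) =====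
-- stated objective: alternative
-- what changed: Replaced A's linear forward/reversed scans with hand-rolled binary searches (bisect_right for increase, bisect_left minus one for decrease) over the sorted batch-size table.
import Mathlib
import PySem

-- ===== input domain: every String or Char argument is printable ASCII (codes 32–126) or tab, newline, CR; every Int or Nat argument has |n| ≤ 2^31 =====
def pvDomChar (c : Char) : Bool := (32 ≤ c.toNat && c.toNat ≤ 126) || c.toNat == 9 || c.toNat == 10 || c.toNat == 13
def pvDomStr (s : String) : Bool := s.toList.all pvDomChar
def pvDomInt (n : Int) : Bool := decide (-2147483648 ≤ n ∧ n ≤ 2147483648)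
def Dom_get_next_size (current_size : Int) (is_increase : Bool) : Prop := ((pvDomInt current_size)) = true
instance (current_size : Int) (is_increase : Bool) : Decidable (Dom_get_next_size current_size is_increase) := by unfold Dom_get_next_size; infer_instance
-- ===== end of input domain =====

-- ===== PORT A =====
-- A: first element > current_size scanning forward (increase), or first element
-- < current_size scanning the reversed list (decrease); current_size if none.
def g_batch_sizes : List Int := [10, 100, 200, 300, 500, 700, 1000]

def pvScanGT : List Int → Int → Int
  | [], c => c
  | x :: xs, c => if x > c then x else pvScanGT xs c

def pvScanLT : List Int → Int → Int
  | [], c => c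
  | x :: xs, c => if x < c then x else pvScanLT xs c

def get_next_size (current_size : Int) (is_increase : Bool) : Int :=
  if is_increase then pvScanGT g_batch_sizes current_size
  else pvScanLT g_batch_sizes.reverse current_size

-- ===== PORT B =====
-- B: binary search. pvBisect with strict=false is bisect_right (first index with
-- element > x), with strict=true it is bisect_left (first index with element ≥ x).
-- The while loop is ported with fuel = initial hi - lo (7 here), decremented once
-- per iteration, which the loop bound guarantees is enough.
def pvBisect (strict : Bool) (a : List Int) (x : Int) : Nat → Nat → Nat → Nat
  | 0, lo, _ => lo
  | fuel + 1, lo, hi =>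
    if lo < hi then
      let mid := (lo + hi) / 2
      if (if strict then a.getD mid 0 < x else a.getD mid 0 ≤ x) then
        pvBisect strict a x fuel (mid + 1) hi
      else
        pvBisect strict a x fuel lo mid
    else lo

def get_next_size_alt (current_size : Int) (is_increase : Bool) : Int :=
  if is_increase then
    let lo := pvBisect false g_batch_sizes current_size g_batch_sizes.length 0 g_batch_sizes.length
    if lo < g_batch_sizes.length then g_batch_sizes.getD lo 0 else current_size
  else
    let lo := pvBisect true g_batch_sizes current_size g_batch_sizes.length 0 g_batch_sizes.length
    if lo ≥ 1 then g_batch_sizes.getD (lo - 1) 0 else current_size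

-- ===== PRECONDITION & SPEC =====
def Spec_get_next_size (current_size : Int) (is_increase : Bool) (out : Int) : Prop := out = get_next_size_alt current_size is_increase
instance (current_size : Int) (is_increase : Bool) (out : Int) : Decidable (Spec_get_next_size current_size is_increase out) := by unfold Spec_get_next_size; infer_instance

-- ===== CLAIM (what is proved, stated in full; the proofs are below) =====
def Claim_equal_get_next_size : Prop := ∀ (current_size : Int) (is_increase : Bool), Dom_get_next_size current_size is_increase → Spec_get_next_size current_size is_increase (get_next_size current_size is_increase)

-- ===== LEMMAS AND PROOFS =====

-- ===== VERDICT (by name: the statement is the Claim_ definition above) =====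
set_option maxHeartbeats 1000000 in
lemma bisR_eval (c : Int) :
    pvBisect false g_batch_sizes c g_batch_sizes.length 0 g_batch_sizes.length =
    (if c < 10 then 0 else if c < 100 then 1 else if c < 200 then 2 else if c < 300 then 3
     else if c < 500 then 4 else if c < 700 then 5 else if c < 1000 then 6 else 7) := by
  norm_num [pvBisect, g_batch_sizes]; split_ifs <;> omega

set_option maxHeartbeats 1000000 in
lemma bisL_eval (c : Int) :
    pvBisect true g_batch_sizes c g_batch_sizes.length 0 g_batch_sizes.length =
    (if c ≤ 10 then 0 else if c ≤ 100 then 1 else if c ≤ 200 then 2 else if c ≤ 300 then 3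
     else if c ≤ 500 then 4 else if c ≤ 700 then 5 else if c ≤ 1000 then 6 else 7) := by
  norm_num [pvBisect, g_batch_sizes]; split_ifs <;> omega

set_option maxHeartbeats 1000000 in
theorem get_next_size_spec : Claim_equal_get_next_size := by
  intro c b _
  unfold Spec_get_next_size get_next_size get_next_size_alt
  cases b <;> simp only [Bool.false_eq_true, if_false, if_true]
  · rw [bisL_eval]
    simp only [pvScanLT, g_batch_sizes, List.reverse, List.reverseAux]
    split_ifs <;> simp_all <;> try omega
  · rw [bisR_eval]
    simp only [pvScanGT, g_batch_sizes]
    split_ifs <;> simp_all <;> try omega
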